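-- pv_equiv track=rewrite | github.com/Dittttto/coding-test | 프로그래머스/3/12938. 최고의 집합/최고의 집합.py | solution
-- ===== SOURCE A (Python) =====
-- def solution(n, s):
--     if s < n:
--         return [-1]
--
--     share, remain = divmod(s, n)
--     answer = [share] * n
--
--     if remain != 0:
--         idx = 0
--         while remain > 0:
--             answer[idx] += 1
--             remain -=1
--             idx = (idx + 1) % n
--
--     answer.sort()
--     return answer
-- ===== SOURCE B (Python) =====
-- def solution(n, s):
--     if s < n:
--         return [-1]
--     share, remain = divmod(s, n)
--     return [share] * (n - remain) + [share + 1] * remain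
-- ===== Notes on version B (the rewrite author's own statement) =====
-- stated objective: faster
-- what changed: Replaces the round-robin increment while-loop plus final sort with a direct closed-form construction: (n - s%n) copies of s//n followed by s%n copies of s//n + 1.
-- outside the precondition, e.g. on solution(0, 3): A raises ZeroDivisionError, B raises ZeroDivisionError
import Mathlib
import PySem

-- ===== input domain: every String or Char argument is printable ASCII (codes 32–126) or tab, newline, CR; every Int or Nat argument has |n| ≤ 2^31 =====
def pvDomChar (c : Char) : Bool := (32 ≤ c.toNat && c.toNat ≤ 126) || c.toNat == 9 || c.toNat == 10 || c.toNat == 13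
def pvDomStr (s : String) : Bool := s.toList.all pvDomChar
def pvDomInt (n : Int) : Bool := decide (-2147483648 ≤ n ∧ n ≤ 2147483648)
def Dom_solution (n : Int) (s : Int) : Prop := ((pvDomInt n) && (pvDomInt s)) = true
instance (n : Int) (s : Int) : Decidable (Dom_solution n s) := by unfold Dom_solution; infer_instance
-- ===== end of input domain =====

-- B replaces A's round-robin increment loop plus a final sort by a direct closed-form
-- construction of the answer (two replicated blocks); asymptotically faster.

-- ===== PORT A =====
-- the while loop: fuel = remain (the loop decrements remain by 1 each iteration);
-- answer[idx] += 1 via List.modify — idx is always in [0, n) here (idx = 0, then (idx+1) % n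
-- with n > 0 whenever the loop runs), so the total List.modify is exact for Python's answer[idx].
def solutionLoop (fuel : Nat) (answer : List Int) (idx : Int) (n : Int) : List Int :=
  match fuel with
  | 0 => answer
  | f + 1 => solutionLoop f (answer.modify idx.toNat (· + 1)) (PySem.Int.mod (idx + 1) n) n

def solution (n : Int) (s : Int) : List Int :=
  if s < n then [-1]
  else
    match PySem.Int.divmod? s n with
    | none => []  -- ZeroDivisionError (n = 0, s ≥ n); excluded by Pre_solution
    | some (share, remain) =>
      let answer := List.replicate n.toNat share   -- [share] * n (empty for n < 0, as in Python)
      let answer := if remain ≠ 0 then solutionLoop remain.toNat answer 0 n else answer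
      PySem.List.sorted answer (fun x => x)

-- ===== PORT B =====
def solution_alt (n : Int) (s : Int) : List Int :=
  if s < n then [-1]
  else
    match PySem.Int.divmod? s n with
    | none => []  -- ZeroDivisionError; excluded by Pre_solution
    | some (share, remain) =>
      List.replicate (n - remain).toNat share ++ List.replicate remain.toNat (share + 1)

-- ===== PRECONDITION & SPEC =====
-- Pre_ excludes exactly n = 0 with s ≥ 0, where Python's divmod(s, n) raises ZeroDivisionError.
def Pre_solution (n : Int) (s : Int) : Prop := ¬ (n = 0 ∧ 0 ≤ s)
instance (n : Int) (s : Int) : Decidable (Pre_solution n s) := by unfold Pre_solution; infer_instance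
def pvWitness_solution : Int × Int := (3, 7)
def Spec_solution (n : Int) (s : Int) (out : List Int) : Prop := out = solution_alt n s
instance (n : Int) (s : Int) (out : List Int) : Decidable (Spec_solution n s out) := by unfold Spec_solution; infer_instance

-- ===== CLAIM (what is proved, stated in full; the proofs are below) =====
def Claim_equal_solution : Prop := ∀ (n : Int) (s : Int), Dom_solution n s → Pre_solution n s → Spec_solution n s (solution n s)

-- ===== LEMMAS AND PROOFS =====

theorem divmod?_of_ne (a b : Int) (h : b ≠ 0) :
    PySem.Int.divmod? a b = some (PySem.Int.floordiv a b, PySem.Int.mod a b) := by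
  simp [PySem.Int.divmod?, PySem.Int.floordiv, PySem.Int.mod, h]

theorem modify_append_cons (l1 l2 : List Int) (x : Int) (f : Int → Int) :
    (l1 ++ x :: l2).modify l1.length f = l1 ++ f x :: l2 := by
  induction l1 with
  | nil => simp [List.modify]
  | cons a t ih => simpa [List.modify] using ih

-- the loop, started at position k of [share+1]*k ++ [share]*(n-k), increments the next r slots
theorem solutionLoop_eq (r : Nat) : ∀ (k : Nat) (share n : Int), 0 < n → (r + k : Int) ≤ n →
    solutionLoop r (List.replicate k (share + 1) ++ List.replicate (n.toNat - k) share)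
      (PySem.Int.mod (k : Int) n) n
    = List.replicate (k + r) (share + 1) ++ List.replicate (n.toNat - (k + r)) share := by
  induction r with
  | zero => intro k share n _ _; simp [solutionLoop]
  | succ r ih =>
    intro k share n hn hb
    have hkn : (k : Int) < n := by omega
    have hmod : PySem.Int.mod (k : Int) n = (k : Int) := by
      rw [PySem.Int.mod_eq_emod_of_pos hn]
      exact Int.emod_eq_of_lt (by positivity) hkn
    have hklen : k < n.toNat := by omega
    have hsplit : List.replicate (n.toNat - k) share
        = share :: List.replicate (n.toNat - (k + 1)) share := by
      rw [show n.toNat - k = (n.toNat - (k + 1)) + 1 by omega, List.replicate_succ]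
    rw [hmod, solutionLoop]
    have hmodify : (List.replicate k (share + 1) ++ List.replicate (n.toNat - k) share).modify
        (k : Int).toNat (· + 1)
        = List.replicate (k + 1) (share + 1) ++ List.replicate (n.toNat - (k + 1)) share := by
      rw [hsplit, show (k : Int).toNat = (List.replicate k (share + 1)).length by simp,
        modify_append_cons]
      simp [List.replicate_succ']
    rw [hmodify, show (k : Int) + 1 = ((k + 1 : Nat) : Int) by push_cast; ring,
      ih (k + 1) share n hn (by push_cast at hb ⊢; omega)]
    have h1 : k + 1 + r = k + (r + 1) := by omega
    rw [h1]

-- sorted of remain copies of share+1 followed by the rest shares = shares first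
theorem sorted_blocks (r m : Nat) (share : Int) :
    PySem.List.sorted (List.replicate r (share + 1) ++ List.replicate m share) (fun x => x)
    = List.replicate m share ++ List.replicate r (share + 1) := by
  apply PySem.List.sorted_id_eq_of_perm_of_pairwise
  · exact List.perm_append_comm
  · rw [List.pairwise_append]
    refine ⟨?_, ?_, ?_⟩
    · rw [List.pairwise_replicate]; right; exact le_refl _
    · rw [List.pairwise_replicate]; right; exact le_refl _
    · intro a ha b hb
      rw [List.eq_of_mem_replicate ha, List.eq_of_mem_replicate hb]; omega

-- ===== VERDICT (by name: the statement is the Claim_ definition above) =====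
theorem solution_spec : Claim_equal_solution := by
  intro n s _ hpre
  unfold Spec_solution solution solution_alt
  by_cases hlt : s < n
  · simp [hlt]
  · simp only [if_neg hlt]
    have hn0 : n ≠ 0 := by
      intro h; exact hpre ⟨h, by omega⟩
    rw [divmod?_of_ne s n hn0]
    dsimp only
    set share := PySem.Int.floordiv s n with hshare
    set remain := PySem.Int.mod s n with hremain
    rcases lt_or_gt_of_ne hn0 with hneg | hpos
    · -- n < 0: answer = [], loop runs zero times, B's two blocks are empty
      have hb := PySem.Int.mod_neg_bounds s hneg
      have h1 : n.toNat = 0 := by omega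
      have h2 : remain.toNat = 0 := by omega
      have h3 : (n - remain).toNat = 0 := by omega
      simp only [h1, h2, h3, List.replicate_zero]
      by_cases hr : remain = 0 <;>
        simp [hr, solutionLoop, PySem.List.sorted]
    · -- n > 0
      have hge : 0 ≤ remain := PySem.Int.mod_nonneg s hpos
      have hltn : remain < n := PySem.Int.mod_lt s hpos
      have hloop := solutionLoop_eq remain.toNat 0 share n hpos (by omega)
      have hmod0 : PySem.Int.mod (0 : Int) n = 0 := by
        rw [PySem.Int.mod_eq_emod_of_pos hpos]; simp
      simp only [Nat.cast_zero, hmod0, List.replicate_zero, List.nil_append,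
        Nat.sub_zero, Nat.zero_add] at hloop
      have hkey : (if remain ≠ 0 then solutionLoop remain.toNat (List.replicate n.toNat share) 0 n
          else List.replicate n.toNat share)
          = List.replicate remain.toNat (share + 1) ++ List.replicate (n.toNat - remain.toNat) share := by
        by_cases hr : remain = 0
        · simp [hr]
        · simpa [hr] using hloop
      rw [hkey, sorted_blocks]
      congr 1
      congr 1
      omega
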